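-- pv_equiv track=rewrite | github.com/nickcarnival/CSCI404 | project2/MaxConnect4Game.py | almostConnected
-- ===== SOURCE A (Python) =====
-- def almostConnected(row, col, state, length):
--     grandTotal = 0
--     count = 0
--     # count all the almost complete verticals
--     for i in range(row, 6):
--         if state[i][col] == state[row][col]: count += 1
--         else: break
--
--     if count >= length: grandTotal += 1
--
--     # count all the almost complete horizontals
--     count = 0
--     for j in range(col, 7):
--         if state[row][j] == state[row][col]: count += 1
--         else: break
--
--     if count >= length: grandTotal += 1
--
--     # count all the almost complete diagonals
--     total = 0
--     count = 0
--     tempCol = col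
--     for i in range(row, 6):
--         if tempCol > 6: break
--         elif state[i][tempCol] == state[row][col]: count += 1
--         else: break
--         tempCol += 1
--
--     if count >= length: total += 1
--
--     # check for diagonals with negative slope
--     count = 0
--     tempCol = col
--     for i in range(row, -1, -1):
--         if tempCol > 6: break
--         elif state[i][tempCol] == state[row][col]: count += 1
--         else: break
--         tempCol += 1  # increment column when row is incremented
--
--     if count >= length: total += 1
--
--     grandTotal += total
--     return grandTotal
-- ===== SOURCE B (Python) =====
-- def almostConnected(row, col, state, length):
--     rays = [
--         [(i, col) for i in range(row, 6)],
--         [(row, j) for j in range(col, 7)],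
--         list(zip(range(row, 6), range(col, 7))),
--         list(zip(range(row, -1, -1), range(col, 7))),
--     ]
--
--     def prefix(cells):
--         if not cells:
--             return 0
--         i, j = cells[0]
--         if state[i][j] != state[row][col]:
--             return 0
--         return 1 + prefix(cells[1:])
--
--     return sum(1 for ray in rays if prefix(ray) >= length)
-- ===== Notes on version B (the rewrite author's own statement) =====
-- stated objective: simpler
-- what changed: B separates geometry from counting: it materialises the four rays as explicit coordinate lists (comprehensions and zips of ranges, the zip truncation replacing A's tempCol>6 break) and measures each with a single recursive equal-prefix counter, instead of A's four hand-unrolled index loops with break statements; …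
-- outside the precondition, e.g. on almostConnected(0, 0, [[1, 2], [2, 3]], 1): A returns 4, B returns 4
import Mathlib
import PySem

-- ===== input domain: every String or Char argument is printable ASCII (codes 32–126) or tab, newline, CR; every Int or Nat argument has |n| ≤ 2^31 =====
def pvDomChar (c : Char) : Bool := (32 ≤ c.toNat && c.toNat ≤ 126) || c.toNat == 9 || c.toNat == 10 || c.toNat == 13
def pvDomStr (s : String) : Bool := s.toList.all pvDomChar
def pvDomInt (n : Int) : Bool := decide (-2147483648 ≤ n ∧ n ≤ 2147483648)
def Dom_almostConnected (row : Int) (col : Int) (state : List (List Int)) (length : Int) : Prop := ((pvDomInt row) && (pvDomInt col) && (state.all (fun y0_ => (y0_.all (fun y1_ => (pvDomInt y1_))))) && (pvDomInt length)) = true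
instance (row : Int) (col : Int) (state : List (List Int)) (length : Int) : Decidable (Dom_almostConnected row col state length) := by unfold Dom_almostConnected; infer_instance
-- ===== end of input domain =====

-- B decouples geometry from counting: it materialises the four rays as coordinate lists
-- (zip of ranges) and counts each ray's equal prefix with one recursive helper (simpler).


-- ===== PORT A =====
-- state[i][j] with Python indexing (negative index from the end); none = IndexError
def aCell (state : List (List Int)) (i j : Int) : Option Int :=
  (PySem.List.pyGet? state i).bind (fun r => PySem.List.pyGet? r j)

-- 'for i in range(row, 6): if state[i][col] == state[row][col]: count += 1 else: break'
-- on 'none' Python raises IndexError (outside Pre_), so the recursion stops there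
def aRunCol (state : List (List Int)) (t : Option Int) (col : Int) (i : Int) : Int :=
  if 6 ≤ i then 0
  else match aCell state i col with
    | none => 0
    | some v => if some v = t then 1 + aRunCol state t col (i + 1) else 0
termination_by (6 - i).toNat
decreasing_by simp_wf; omega

-- 'for j in range(col, 7): if state[row][j] == state[row][col]: count += 1 else: break'
def aRunRow (state : List (List Int)) (t : Option Int) (row : Int) (j : Int) : Int :=
  if 7 ≤ j then 0
  else match aCell state row j with
    | none => 0
    | some v => if some v = t then 1 + aRunRow state t row (j + 1) else 0
termination_by (7 - j).toNat
decreasing_by simp_wf; omega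

-- 'for i in range(row, 6): if tempCol > 6: break elif …' with tempCol += 1
def aRunDiagUp (state : List (List Int)) (t : Option Int) (i tempCol : Int) : Int :=
  if 6 ≤ i then 0
  else if tempCol > 6 then 0
  else match aCell state i tempCol with
    | none => 0
    | some v => if some v = t then 1 + aRunDiagUp state t (i + 1) (tempCol + 1) else 0
termination_by (6 - i).toNat
decreasing_by simp_wf; omega

-- 'for i in range(row, -1, -1): if tempCol > 6: break elif …' with tempCol += 1
def aRunDiagDown (state : List (List Int)) (t : Option Int) (i tempCol : Int) : Int :=
  if i ≤ -1 then 0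
  else if tempCol > 6 then 0
  else match aCell state i tempCol with
    | none => 0
    | some v => if some v = t then 1 + aRunDiagDown state t (i - 1) (tempCol + 1) else 0
termination_by (i + 1).toNat
decreasing_by simp_wf; omega

def almostConnected (row : Int) (col : Int) (state : List (List Int)) (length : Int) : Int :=
  let t := aCell state row col
  let c1 := aRunCol state t col row
  let g1 : Int := if c1 ≥ length then 1 else 0
  let c2 := aRunRow state t row col
  let g2 : Int := if c2 ≥ length then 1 else 0
  let c3 := aRunDiagUp state t row col
  let t1 : Int := if c3 ≥ length then 1 else 0
  let c4 := aRunDiagDown state t row col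
  let t2 : Int := if c4 ≥ length then 1 else 0
  (g1 + g2) + (t1 + t2)

-- ===== PORT B =====
def bCell (state : List (List Int)) (i j : Int) : Option Int :=
  (PySem.List.pyGet? state i).bind (fun r => PySem.List.pyGet? r j)

-- Source B's recursive prefix(cells), comparing state[i][j] with state[row][col];
-- 'none' is where either lookup raises IndexError (outside Pre_)
def bPrefix (state : List (List Int)) (row col : Int) : List (Int × Int) → Int
  | [] => 0
  | c :: rest =>
      match bCell state c.1 c.2, bCell state row col with
      | some v, some t => if v ≠ t then 0 else 1 + bPrefix state row col rest
      | _, _ => 0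

-- 'list(zip(range(row, -1, -1), range(col, 7)))': Python's zip pulls one element from
-- each (lazy) range per step and stops when either is exhausted — exactly this recursion
def bZipDown (i j : Int) : List (Int × Int) :=
  if i ≤ -1 ∨ 7 ≤ j then [] else (i, j) :: bZipDown (i - 1) (j + 1)
termination_by (i + 1).toNat
decreasing_by simp_wf; omega

-- the four coordinate rays of Source B, built from ranges exactly as Source B builds them
def bRays (row col : Int) : List (List (Int × Int)) :=
  [ (PySem.List.pyRange row 6 1).map (fun i => (i, col)),
    (PySem.List.pyRange col 7 1).map (fun j => (row, j)),
    (PySem.List.pyRange row 6 1).zip (PySem.List.pyRange col 7 1),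
    bZipDown row col ]

def almostConnected_alt (row : Int) (col : Int) (state : List (List Int)) (length : Int) : Int :=
  (bRays row col).foldl
    (fun acc ray => if bPrefix state row col ray ≥ length then acc + 1 else acc) 0

-- ===== PRECONDITION & SPEC =====
-- Pre_ is the function's natural domain — a full 6×7 Connect-4 board with a Python-valid
-- (possibly negative) cell index — plus the corner 6 ≤ row ∧ 7 ≤ col, where every scan is
-- empty and neither version reads a cell. Outside it A raises IndexError mid-scan except
-- on boards whose scans happen to stop right before a missing cell, where B reads the
-- same cells in the same order and returns the same value.
def Pre_almostConnected (row : Int) (col : Int) (state : List (List Int)) (length : Int) : Prop :=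
  (6 ≤ row ∧ 7 ≤ col) ∨
  (state.length = 6 ∧ (∀ r ∈ state, r.length = 7) ∧
   -6 ≤ row ∧ row < 6 ∧ -7 ≤ col ∧ col < 7)
instance (row : Int) (col : Int) (state : List (List Int)) (length : Int) : Decidable (Pre_almostConnected row col state length) := by unfold Pre_almostConnected; infer_instance

def pvWitness_almostConnected : Int × Int × List (List Int) × Int :=
  (2, 3,
   [[0,0,0,0,0,0,0],[0,0,0,0,0,0,0],[0,0,0,0,0,0,0],
    [0,0,0,0,0,0,0],[0,0,0,0,0,0,0],[0,0,0,0,0,0,0]], 4)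

def Spec_almostConnected (row : Int) (col : Int) (state : List (List Int)) (length : Int) (out : Int) : Prop := out = almostConnected_alt row col state length
instance (row : Int) (col : Int) (state : List (List Int)) (length : Int) (out : Int) : Decidable (Spec_almostConnected row col state length out) := by unfold Spec_almostConnected; infer_instance

-- ===== CLAIM (what is proved, stated in full; the proofs are below) =====
def Claim_equal_almostConnected : Prop := ∀ (row : Int) (col : Int) (state : List (List Int)) (length : Int), Dom_almostConnected row col state length → Pre_almostConnected row col state length → Spec_almostConnected row col state length (almostConnected row col state length)

-- ===== LEMMAS AND PROOFS =====

theorem bCell_eq_aCell (state : List (List Int)) (i j : Int) :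
    bCell state i j = aCell state i j := rfl

-- on the full 6×7 board every Python-valid (possibly negative) access succeeds
theorem cell_some (state : List (List Int)) (hlen : state.length = 6)
    (hrow : ∀ r ∈ state, r.length = 7) (i j : Int)
    (hi0 : -6 ≤ i) (hi6 : i < 6) (hj0 : -7 ≤ j) (hj7 : j < 7) :
    ∃ v, aCell state i j = some v := by
  obtain ⟨r, hr⟩ : ∃ r, PySem.List.pyGet? state i = some r := by
    cases hc : PySem.List.pyGet? state i with
    | some r => exact ⟨r, rfl⟩
    | none =>
      rw [PySem.List.pyGet?_eq_none_iff] at hc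
      exact absurd (by unfold PySem.Raise.InRange; omega) hc
  have h7 : r.length = 7 := hrow r (PySem.List.mem_of_pyGet?_eq_some state hr)
  obtain ⟨v, hv⟩ : ∃ v, PySem.List.pyGet? r j = some v := by
    cases hc : PySem.List.pyGet? r j with
    | some v => exact ⟨v, rfl⟩
    | none =>
      rw [PySem.List.pyGet?_eq_none_iff] at hc
      exact absurd (by unfold PySem.Raise.InRange; omega) hc
  exact ⟨v, by simp [aCell, hr, hv]⟩

-- vertical scan = prefix of the vertical ray
theorem vert_eq (state : List (List Int)) (row col tv : Int)
    (hlen : state.length = 6) (hrow : ∀ r ∈ state, r.length = 7)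
    (htv : aCell state row col = some tv)
    (hc0 : -7 ≤ col) (hc7 : col < 7)
    (n : Nat) (i : Int) (hi : i = 6 - (n : Int)) (h0 : -6 ≤ i) :
    aRunCol state (some tv) col i
      = bPrefix state row col ((PySem.List.pyRange i 6 1).map (fun k => (k, col))) := by
  induction n generalizing i with
  | zero =>
      have h6 : i = 6 := by omega
      subst h6
      rw [aRunCol, PySem.List.pyRange_one_eq_nil (by omega)]
      simp [bPrefix]
  | succ n ih =>
      obtain ⟨v, hv⟩ := cell_some state hlen hrow i col h0 (by omega) hc0 hc7
      rw [aRunCol, PySem.List.pyRange_one_cons (by omega)]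
      simp only [List.map_cons, bPrefix, bCell_eq_aCell, hv, htv, show ¬ (6 ≤ i) by omega,
        if_false]
      by_cases h : v = tv
      · subst h
        simp [ih (i + 1) (by omega) (by omega)]
      · simp [h]

-- horizontal scan = prefix of the horizontal ray
theorem horiz_eq (state : List (List Int)) (row col tv : Int)
    (hlen : state.length = 6) (hrow : ∀ r ∈ state, r.length = 7)
    (htv : aCell state row col = some tv)
    (hr0 : -6 ≤ row) (hr6 : row < 6)
    (n : Nat) (j : Int) (hj : j = 7 - (n : Int)) (h0 : -7 ≤ j) :
    aRunRow state (some tv) row j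
      = bPrefix state row col ((PySem.List.pyRange j 7 1).map (fun k => (row, k))) := by
  induction n generalizing j with
  | zero =>
      have h7 : j = 7 := by omega
      subst h7
      rw [aRunRow, PySem.List.pyRange_one_eq_nil (by omega)]
      simp [bPrefix]
  | succ n ih =>
      obtain ⟨v, hv⟩ := cell_some state hlen hrow row j hr0 hr6 h0 (by omega)
      rw [aRunRow, PySem.List.pyRange_one_cons (by omega)]
      simp only [List.map_cons, bPrefix, bCell_eq_aCell, hv, htv, show ¬ (7 ≤ j) by omega,
        if_false]
      by_cases h : v = tv
      · subst h
        simp [ih (j + 1) (by omega) (by omega)]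
      · simp [h]

-- ascending diagonal scan = prefix of zip of the two ranges
theorem diagp_eq (state : List (List Int)) (row col tv : Int)
    (hlen : state.length = 6) (hrow : ∀ r ∈ state, r.length = 7)
    (htv : aCell state row col = some tv)
    (n : Nat) (i j : Int) (hi : i = 6 - (n : Int)) (h0 : -6 ≤ i) (hj : -7 ≤ j) :
    aRunDiagUp state (some tv) i j
      = bPrefix state row col ((PySem.List.pyRange i 6 1).zip (PySem.List.pyRange j 7 1)) := by
  induction n generalizing i j with
  | zero =>
      have h6 : i = 6 := by omega
      subst h6
      rw [aRunDiagUp, PySem.List.pyRange_one_eq_nil (show (6:Int) ≤ 6 by omega)]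
      simp [bPrefix]
  | succ n ih =>
      rw [aRunDiagUp]
      by_cases hb : j > 6
      · rw [PySem.List.pyRange_one_eq_nil (show (7:Int) ≤ j by omega)]
        simp [bPrefix, show ¬ (6 ≤ i) by omega, hb]
      · obtain ⟨v, hv⟩ := cell_some state hlen hrow i j h0 (by omega) hj (by omega)
        rw [PySem.List.pyRange_one_cons (show i < 6 by omega),
          PySem.List.pyRange_one_cons (show j < 7 by omega)]
        simp only [List.zip_cons_cons, bPrefix, bCell_eq_aCell, hv, htv,
          show ¬ (6 ≤ i) by omega, if_false, hb]
        by_cases h : v = tv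
        · subst h
          simp [ih (i + 1) (j + 1) (by omega) (by omega) (by omega)]
        · simp [h]

-- descending diagonal scan = prefix of zip of the countdown range with the column range
theorem diagn_eq (state : List (List Int)) (row col tv : Int)
    (hlen : state.length = 6) (hrow : ∀ r ∈ state, r.length = 7)
    (htv : aCell state row col = some tv)
    (n : Nat) (i j : Int) (hi : i ≤ (n : Int) - 1) (hi6 : i < 6) (hj : -7 ≤ j) :
    aRunDiagDown state (some tv) i j
      = bPrefix state row col (bZipDown i j) := by
  induction n generalizing i j with
  | zero =>
      rw [aRunDiagDown, bZipDown]
      simp [bPrefix, show i ≤ -1 by omega]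
  | succ n ih =>
      by_cases hneg : i ≤ -1
      · rw [aRunDiagDown, bZipDown]
        simp [bPrefix, hneg]
      rw [aRunDiagDown]
      by_cases hb : j > 6
      · rw [bZipDown]
        simp [bPrefix, show ¬ (i ≤ -1) by omega, hb, show (7:Int) ≤ j by omega]
      · obtain ⟨v, hv⟩ := cell_some state hlen hrow i j (by omega) hi6 hj (by omega)
        have hz : bZipDown i j = (i, j) :: bZipDown (i - 1) (j + 1) := by
          rw [bZipDown]; simp [show ¬ (i ≤ -1 ∨ 7 ≤ j) by omega]
        rw [hz]
        simp only [bPrefix, bCell_eq_aCell, hv, htv,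
          show ¬ (i ≤ -1) by omega, if_false, hb]
        by_cases h : v = tv
        · subst h
          simp [ih (i - 1) (j + 1) (by omega) (by omega) (by omega)]
        · simp [h]

-- ===== VERDICT (by name: the statement is the Claim_ definition above) =====
theorem almostConnected_spec : Claim_equal_almostConnected := by
  intro row col state length _ hpre
  unfold Spec_almostConnected almostConnected almostConnected_alt
  rcases hpre with ⟨hr, hc⟩ | ⟨hlen, hrow, hr0, hr6, hc0, hc7⟩
  · -- no-access corner: every range of B is empty, every scan of A stops before a read
    have e1 : aRunCol state (aCell state row col) col row = 0 := by
      rw [aRunCol]; simp [show (6:Int) ≤ row by omega]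
    have e2 : aRunRow state (aCell state row col) row col = 0 := by
      rw [aRunRow]; simp [show (7:Int) ≤ col by omega]
    have e3 : aRunDiagUp state (aCell state row col) row col = 0 := by
      rw [aRunDiagUp]; simp [show (6:Int) ≤ row by omega]
    have e4 : aRunDiagDown state (aCell state row col) row col = 0 := by
      rw [aRunDiagDown]; simp [show ¬ (row ≤ -1) by omega, show col > 6 by omega]
    have ez : bZipDown row col = [] := by rw [bZipDown]; simp [show (7:Int) ≤ col by omega]
    simp only [bRays, PySem.List.pyRange_one_eq_nil (show (6:Int) ≤ row by omega),
      PySem.List.pyRange_one_eq_nil (show (7:Int) ≤ col by omega),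
      List.zip_nil_right, List.map_nil, List.foldl, bPrefix, ez,
      e1, e2, e3, e4]
    split_ifs <;> omega
  · obtain ⟨tv, htv⟩ := cell_some state hlen hrow row col hr0 hr6 hc0 hc7
    have h1 := vert_eq state row col tv hlen hrow htv hc0 hc7 (6 - row).toNat row (by omega) hr0
    have h2 := horiz_eq state row col tv hlen hrow htv hr0 hr6 (7 - col).toNat col (by omega) hc0
    have h3 := diagp_eq state row col tv hlen hrow htv (6 - row).toNat row col (by omega) hr0 hc0
    have h4 := diagn_eq state row col tv hlen hrow htv (row + 1).toNat row col (by omega) hr6 hc0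
    simp only [bRays, List.foldl, htv, h1, h2, h3, h4]
    split_ifs <;> omega
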